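-- pv_equiv track=rewrite | github.com/George-c0de/scrap_newspapers | main.py | lang
-- ===== SOURCE A (Python) =====
-- def lang(st):
--     flag = 0
--     k = ""
--     default = "ru"
--     for el in st:
--         if el == "/":
--             flag = flag + 1
--             continue
--         if flag >= 3:
--             if flag == 4:
--                 if len(k) != 2:
--                     return default
--                 else:
--                     return k
--             k = k + el
-- ===== SOURCE B (Python) =====
-- def lang(st):
--     segs = st.split('/')
--     if len(segs) >= 5 and segs[4] != '':
--         return segs[3] if len(segs[3]) == 2 else 'ru'
--     return None
-- ===== Notes on version B (the rewrite author's own statement) =====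
-- stated objective: idiomatic
-- what changed: Replaces the per-character slash-counting scan with accumulator and early return by a single str.split on the slash separator followed by index checks: return segs[3] validated to length 2 (else the default), only when segs[4] exists and is nonempty.
import Mathlib
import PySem

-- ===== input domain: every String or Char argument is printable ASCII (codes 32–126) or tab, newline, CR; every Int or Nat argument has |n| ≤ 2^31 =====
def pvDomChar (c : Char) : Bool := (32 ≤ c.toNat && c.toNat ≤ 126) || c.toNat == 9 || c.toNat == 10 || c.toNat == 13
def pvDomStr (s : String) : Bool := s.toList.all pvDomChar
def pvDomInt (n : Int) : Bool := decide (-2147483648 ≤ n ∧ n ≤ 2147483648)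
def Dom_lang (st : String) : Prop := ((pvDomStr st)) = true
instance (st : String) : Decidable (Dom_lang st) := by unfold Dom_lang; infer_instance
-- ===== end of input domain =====

-- B replaces A's per-character slash-counting scan by a single split on the separator plus index checks (idiomatic; a timing run measured it constant-factor faster).

-- ===== PORT A =====
-- the for-loop of A: state is (flag, k); falling off the end returns None
def langGo : List Char → Nat → List Char → Option String
  | [], _, _ => none
  | el :: rest, flag, k =>
    if el = '/' then langGo rest (flag + 1) k
    else if 3 ≤ flag then
      if flag = 4 then
        if PySem.Chars.len k ≠ 2 then some "ru" else some (String.ofList k)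
      else langGo rest flag (k ++ [el])
    else langGo rest flag k

def lang (st : String) : Option String := langGo st.toList 0 []

-- ===== PORT B =====
-- segs[4] / segs[3]: plain indexing, in bounds by the guard; ported as getD
def lang_alt (st : String) : Option String :=
  match PySem.Str.split? st "/" with
  | none => none  -- unreachable: the separator "/" is nonempty
  | some segs =>
    if 5 ≤ segs.length ∧ segs.getD 4 "" ≠ "" then
      if PySem.Str.len (segs.getD 3 "") = 2 then some (segs.getD 3 "") else some "ru"
    else none

-- ===== PRECONDITION & SPEC =====
def Spec_lang (st : String) (out : Option String) : Prop := out = lang_alt st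
instance (st : String) (out : Option String) : Decidable (Spec_lang st out) := by unfold Spec_lang; infer_instance

-- ===== CLAIM (what is proved, stated in full; the proofs are below) =====
def Claim_equal_lang : Prop := ∀ (st : String), Dom_lang st → Spec_lang st (lang st)

-- ===== LEMMAS AND PROOFS =====

-- splitting a char list on '/' (proof-side reference model)
def splitChar : List Char → List (List Char)
  | [] => [[]]
  | c :: r =>
    if c = '/' then [] :: splitChar r
    else
      match splitChar r with
      | [] => [[c]]
      | s :: t => (c :: s) :: t

theorem splitChar_ne_nil (l : List Char) : splitChar l ≠ [] := by
  cases l with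
  | nil => simp [splitChar]
  | cons c r =>
    simp only [splitChar]
    split
    · simp
    · cases h : splitChar r <;> simp

-- prepend onto the first segment
def consHead (p : List Char) : List (List Char) → List (List Char)
  | [] => [p]
  | s :: t => (p ++ s) :: t

theorem splitOn_go_spec (fuel : Nat) (l cur : List Char) (acc : List (List Char))
    (h : l.length < fuel) :
    PySem.Chars.splitOn.go ['/'] fuel l cur acc =
      acc.reverse ++ consHead cur.reverse (splitChar l) := by
  induction fuel generalizing l cur acc with
  | zero => omega
  | succ n ih =>
    cases l with
    | nil =>
      simp [PySem.Chars.splitOn.go, splitChar, consHead]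
    | cons c r =>
      by_cases hc : c = '/'
      · subst hc
        rw [show PySem.Chars.splitOn.go ['/'] (n+1) ('/' :: r) cur acc
              = PySem.Chars.splitOn.go ['/'] n r [] (cur.reverse :: acc) by
            simp [PySem.Chars.splitOn.go, List.isPrefixOf]]
        rw [ih r [] (cur.reverse :: acc) (by simpa using Nat.lt_of_succ_lt_succ h)]
        cases hs : splitChar r with
        | nil => exact absurd hs (splitChar_ne_nil r)
        | cons s t => simp [splitChar, consHead, hs]
      · rw [show PySem.Chars.splitOn.go ['/'] (n+1) (c :: r) cur acc
              = PySem.Chars.splitOn.go ['/'] n r (c :: cur) acc by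
            simp only [PySem.Chars.splitOn.go, List.isPrefixOf, Bool.and_eq_true, beq_iff_eq]
            rw [if_neg]
            rintro ⟨h', -⟩
            exact hc h'.symm]
        rw [ih r (c :: cur) acc (by simpa using Nat.lt_of_succ_lt_succ h)]
        cases hs : splitChar r with
        | nil => exact absurd hs (splitChar_ne_nil r)
        | cons s t => simp [splitChar, consHead, hc, hs]

theorem splitOn_eq_splitChar (l : List Char) :
    PySem.Chars.splitOn l ['/'] = splitChar l := by
  have h := splitOn_go_spec (l.length + 1) l [] [] (Nat.lt_succ_self _)
  cases hs : splitChar l with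
  | nil => exact absurd hs (splitChar_ne_nil l)
  | cons s t =>
    rw [hs] at h
    simpa [PySem.Chars.splitOn, consHead] using h

-- A's value with flag ≥ 5: the loop can never return again
theorem langGo_of_ge_five (l : List Char) (flag : Nat) (k : List Char) (h : 5 ≤ flag) :
    langGo l flag k = none := by
  induction l generalizing flag k with
  | nil => rfl
  | cons c r ih =>
    simp only [langGo]
    split
    · exact ih (flag + 1) k (by omega)
    · rw [if_pos (by omega : 3 ≤ flag), if_neg (by omega : ¬ flag = 4)]
      exact ih flag (k ++ [c]) h

-- A's value with flag = 4: decided by the very next character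
theorem langGo_four (l : List Char) (k : List Char) :
    langGo l 4 k =
      match l with
      | [] => none
      | c :: _ =>
        if c = '/' then none
        else if PySem.Chars.len k ≠ 2 then some "ru" else some (String.ofList k) := by
  cases l with
  | nil => rfl
  | cons c r =>
    by_cases hc : c = '/'
    · subst hc
      rw [show langGo ('/' :: r) 4 k = langGo r 5 k from by simp [langGo]]
      rw [langGo_of_ge_five r 5 k (le_refl 5)]
      simp
    · simp [langGo, hc]

-- A's value with flag ≤ 3, as a condition on splitChar of the rest
theorem langGo_le_three (l : List Char) (flag : Nat) (k : List Char) (h : flag ≤ 3) :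
    langGo l flag k =
      (if 5 - flag ≤ (splitChar l).length ∧ (splitChar l).getD (4 - flag) [] ≠ [] then
        (if PySem.Chars.len (k ++ (splitChar l).getD (3 - flag) []) = 2 then
          some (String.ofList (k ++ (splitChar l).getD (3 - flag) []))
        else some "ru")
      else none) := by
  induction l generalizing flag k with
  | nil =>
    rw [if_neg]
    · rfl
    rintro ⟨-, hcon⟩
    apply hcon
    obtain ⟨m, hm⟩ : ∃ m, 4 - flag = m + 1 := ⟨3 - flag, by omega⟩
    simp [splitChar, hm, List.getD]
  | cons c r ih =>
    by_cases hc : c = '/'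
    · subst hc
      rw [show langGo ('/' :: r) flag k = langGo r (flag + 1) k by simp [langGo]]
      by_cases h3 : flag = 3
      · subst h3
        rw [langGo_four r k]
        cases r with
        | nil => simp [splitChar]
        | cons c' r' =>
          by_cases hc' : c' = '/'
          · subst hc'
            have hnn := splitChar_ne_nil r'
            cases hs : splitChar r' with
            | nil => exact absurd hs hnn
            | cons s t => simp [splitChar, hs]
          · have hnn := splitChar_ne_nil r'
            cases hs : splitChar r' with
            | nil => exact absurd hs hnn
            | cons s t =>
              simp only [splitChar, hs, if_neg hc']
              by_cases hk : PySem.Chars.len k = 2 <;>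
                simp [List.getD]
      · have hlt : flag + 1 ≤ 3 := by omega
        rw [ih (flag + 1) k hlt]
        have hnn := splitChar_ne_nil r
        cases hs : splitChar r with
        | nil => exact absurd hs hnn
        | cons s t =>
          have e5 : 5 - flag = (5 - (flag + 1)) + 1 := by omega
          have e4 : 4 - flag = (4 - (flag + 1)) + 1 := by omega
          have e3 : 3 - flag = (3 - (flag + 1)) + 1 := by omega
          simp [splitChar, hs, e5, e4, e3]
    · have hnn := splitChar_ne_nil r
      cases hs : splitChar r with
      | nil => exact absurd hs hnn
      | cons s t =>
        by_cases h3 : 3 ≤ flag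
        · have h33 : flag = 3 := by omega
          subst h33
          rw [show langGo (c :: r) 3 k = langGo r 3 (k ++ [c]) by simp [langGo, hc]]
          rw [ih 3 (k ++ [c]) (le_refl 3)]
          simp [splitChar, hs, hc, List.getD]
        · have hf : flag ≤ 2 := by omega
          rw [show langGo (c :: r) flag k = langGo r flag k by simp [langGo, hc, h3]]
          rw [ih flag k h]
          have e4 : 4 - flag = (3 - flag) + 1 := by omega
          obtain ⟨m, hm⟩ : ∃ m, 3 - flag = m + 1 := ⟨2 - flag, by omega⟩
          simp [splitChar, hs, hc, e4, hm, List.getD]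

theorem getD_map_ofList (L : List (List Char)) (i : Nat) (h : i < L.length) :
    (L.map String.ofList).getD i "" = String.ofList (L.getD i []) := by
  rw [List.getD_eq_getElem _ _ (by simpa using h), List.getD_eq_getElem _ _ h]
  simp

-- ===== VERDICT (by name: the statement is the Claim_ definition above) =====
theorem lang_spec : Claim_equal_lang := by
  intro st _
  show lang st = lang_alt st
  have hsplit : PySem.Str.split? st "/"
      = some ((splitChar st.toList).map String.ofList) := by
    simp [PySem.Str.split?, PySem.Chars.split?,
      show ("/" : String).toList = ['/'] from rfl, splitOn_eq_splitChar]
  have halt : lang_alt st =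
      (if 5 ≤ ((splitChar st.toList).map String.ofList).length ∧
          ((splitChar st.toList).map String.ofList).getD 4 "" ≠ "" then
        (if PySem.Str.len (((splitChar st.toList).map String.ofList).getD 3 "") = 2 then
          some (((splitChar st.toList).map String.ofList).getD 3 "")
        else some "ru")
      else none) := by
    unfold lang_alt
    rw [hsplit]
  rw [halt]
  unfold lang
  rw [langGo_le_three st.toList 0 [] (by omega)]
  simp only [Nat.sub_zero, List.nil_append, List.length_map]
  have hlenOf : ∀ l : List Char, PySem.Str.len (String.ofList l) = (l.length : Int) := by
    intro l
    simp [PySem.Str.len]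
  by_cases h5 : 5 ≤ (splitChar st.toList).length
  · rw [getD_map_ofList _ 4 (by omega), getD_map_ofList _ 3 (by omega), hlenOf]
    by_cases hne : (splitChar st.toList).getD 4 [] = []
    · rw [if_neg (by rintro ⟨-, hcon⟩; exact hcon hne),
        if_neg (by rintro ⟨-, hcon⟩; exact hcon (by rw [hne]))]
    · have hA : 5 ≤ (splitChar st.toList).length ∧
          (splitChar st.toList).getD 4 [] ≠ [] := ⟨h5, hne⟩
      have hB : 5 ≤ (splitChar st.toList).length ∧
          String.ofList ((splitChar st.toList).getD 4 []) ≠ "" := by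
        refine ⟨h5, fun hcon => hne ?_⟩
        have := congrArg String.toList hcon
        simpa using this
      rw [if_pos hA, if_pos hB]
      by_cases hk : PySem.Chars.len ((splitChar st.toList).getD 3 []) = 2
      · rw [if_pos hk, if_pos (by simpa [PySem.Chars.len] using hk)]
      · rw [if_neg hk, if_neg (by simpa [PySem.Chars.len] using hk)]
  · rw [if_neg (by rintro ⟨hc, -⟩; omega), if_neg (by rintro ⟨hc, -⟩; omega)]
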